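-- pv_equiv track=rewrite | github.com/aimasteracc/tree-sitter-analyzer | tree_sitter_analyzer/core/ast_chunker.py | detect_semantic_boundaries
-- ===== SOURCE A (Python) =====
-- def detect_semantic_boundaries(
--     source: str,
--     total_lines: int,
-- ) -> list[int]:
--     """Detect natural code boundary lines suitable for splitting.
--
--     Returns sorted list of 1-based line numbers where the code has
--     natural semantic breaks: blank-line gaps, block comment endings,
--     and annotation group boundaries.
--
--     Args:
--         source: raw source text
--         total_lines: total number of lines in the file
--
--     Returns:
--         list of 1-based line numbers representing boundary positions
--     """
--     if total_lines <= 0: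
--         return []
--
--     lines = source.split("\n")
--     boundaries: set[int] = set()
--
--     # Blank-line gaps: 2+ consecutive blank lines mark a section break
--     blank_run_start = -1
--     for i, line in enumerate(lines):
--         if line.strip() == "":
--             if blank_run_start < 0:
--                 blank_run_start = i
--         else:
--             if blank_run_start >= 0 and i - blank_run_start >= 2:
--                 boundaries.add(blank_run_start + 1)
--             blank_run_start = -1
--
--     # Block comment endings: */ on its own line marks a section boundary
--     for i, line in enumerate(lines):
--         stripped = line.strip()
--         if stripped == "*/" or stripped.endswith("*/") and stripped.startswith("*"):
--             if i + 2 < len(lines):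
--                 boundaries.add(i + 2)
--
--     # Annotation groups: line after a run of @annotations
--     in_annotation_run = False
--     for i, line in enumerate(lines):
--         stripped = line.strip()
--         is_annotation = stripped.startswith("@")
--         if is_annotation:
--             in_annotation_run = True
--         elif in_annotation_run and stripped:
--             boundaries.add(i + 1)
--             in_annotation_run = False
--
--     return sorted(boundaries)
-- ===== SOURCE B (Python) =====
-- def detect_semantic_boundaries(source, total_lines):
--     """Single fused pass over stripped lines using a precomputed
--     previous-non-blank-line index instead of three stateful scans."""
--     if total_lines <= 0:
--         return []
--     st = [line.strip() for line in source.split("\n")]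
--     n = len(st)
--     prev = []          # prev[i] = index of nearest non-blank line before i, or -1
--     p = -1
--     for i, s in enumerate(st):
--         prev.append(p)
--         if s:
--             p = i
--     b = set()
--     for i, s in enumerate(st):
--         if s:
--             if i >= 2 and not st[i - 1] and not st[i - 2]:
--                 b.add(prev[i] + 2)
--             q = prev[i]
--             if not s.startswith("@") and q >= 0 and st[q].startswith("@"):
--                 b.add(i + 1)
--         if (s == "*/" or (s.endswith("*/") and s.startswith("*"))) and i + 2 < n:
--             b.add(i + 2)
--     return sorted(b)
-- ===== Notes on version B (the rewrite author's own statement) =====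
-- stated objective: alternative
-- what changed: A's three independent stateful scans (blank-run tracking, comment scan, annotation-run flag) are replaced by one precomputed previous-non-blank-line index array plus a single fused pass whose per-line conditions are purely local (no run state).
import Mathlib
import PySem

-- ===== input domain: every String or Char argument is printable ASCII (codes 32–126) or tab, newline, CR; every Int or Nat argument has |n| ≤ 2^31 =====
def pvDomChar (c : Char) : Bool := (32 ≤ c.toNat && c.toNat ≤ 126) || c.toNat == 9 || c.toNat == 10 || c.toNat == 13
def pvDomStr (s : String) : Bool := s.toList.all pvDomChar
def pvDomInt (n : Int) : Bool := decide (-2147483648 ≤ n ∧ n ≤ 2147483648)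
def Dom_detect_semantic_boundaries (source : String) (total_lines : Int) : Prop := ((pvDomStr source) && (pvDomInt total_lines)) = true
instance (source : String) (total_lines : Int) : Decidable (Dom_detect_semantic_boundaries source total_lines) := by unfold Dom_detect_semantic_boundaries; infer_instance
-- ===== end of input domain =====

-- B replaces A's three stateful scans by one precomputed previous-non-blank index plus a single
-- fused pass with purely local per-line conditions (objective: alternative decomposition).

-- ===== PORT A =====
def detect_semantic_boundaries (source : String) (total_lines : Int) : List Int :=
  if total_lines ≤ 0 then []
  else
    let lines := (PySem.Str.split? source "\n").getD []
    let boundaries : PySem.Set Int := PySem.Set.empty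
    -- Blank-line gaps: 2+ consecutive blank lines mark a section break
    let p1 := (PySem.List.enumerate lines 0).foldl
      (fun (st : Int × PySem.Set Int) (il : Int × String) =>
        if PySem.Str.strip il.2 == "" then
          (if st.1 < 0 then (il.1, st.2) else st)
        else
          (-1, if st.1 ≥ 0 ∧ il.1 - st.1 ≥ 2 then PySem.Set.add st.2 (st.1 + 1) else st.2))
      (-1, boundaries)
    -- Block comment endings: */ on its own line marks a section boundary
    let b2 := (PySem.List.enumerate lines 0).foldl
      (fun (b : PySem.Set Int) (il : Int × String) =>
        let stripped := PySem.Str.strip il.2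
        if stripped == "*/" || (PySem.Str.endswith stripped "*/" && PySem.Str.startswith stripped "*") then
          (if il.1 + 2 < (lines.length : Int) then PySem.Set.add b (il.1 + 2) else b)
        else b) p1.2
    -- Annotation groups: line after a run of @annotations
    let p3 := (PySem.List.enumerate lines 0).foldl
      (fun (st : Bool × PySem.Set Int) (il : Int × String) =>
        let stripped := PySem.Str.strip il.2
        if PySem.Str.startswith stripped "@" then (true, st.2)
        else if st.1 && !(stripped == "") then (false, PySem.Set.add st.2 (il.1 + 1))
        else st)
      (false, b2)
    PySem.List.sorted p3.2 (fun x => x) false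

-- ===== PORT B =====
def detect_semantic_boundaries_alt (source : String) (total_lines : Int) : List Int :=
  if total_lines ≤ 0 then []
  else
    let st := ((PySem.Str.split? source "\n").getD []).map PySem.Str.strip
    let n : Int := st.length
    -- prev[i] = index of nearest non-blank line before i, or -1
    let pp := (PySem.List.enumerate st 0).foldl
      (fun (acc : Int × List Int) (is : Int × String) =>
        (if !(is.2 == "") then is.1 else acc.1, acc.2 ++ [acc.1])) (-1, [])
    let prev := pp.2
    let b := (PySem.List.enumerate st 0).foldl
      (fun (b : PySem.Set Int) (is : Int × String) =>
        let b :=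
          if !(is.2 == "") then
            let b :=
              if 2 ≤ is.1 ∧ PySem.List.pyGetD st (is.1 - 1) "" == "" ∧ PySem.List.pyGetD st (is.1 - 2) "" == ""
              then PySem.Set.add b (PySem.List.pyGetD prev is.1 (-1) + 2) else b
            let q := PySem.List.pyGetD prev is.1 (-1)
            if !PySem.Str.startswith is.2 "@" ∧ 0 ≤ q ∧ PySem.Str.startswith (PySem.List.pyGetD st q "") "@"
            then PySem.Set.add b (is.1 + 1) else b
          else b
        if (is.2 == "*/" || (PySem.Str.endswith is.2 "*/" && PySem.Str.startswith is.2 "*")) ∧ is.1 + 2 < n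
        then PySem.Set.add b (is.1 + 2) else b)
      PySem.Set.empty
    PySem.List.sorted b (fun x => x) false

-- ===== PRECONDITION & SPEC =====
def Spec_detect_semantic_boundaries (source : String) (total_lines : Int) (out : List Int) : Prop := out = detect_semantic_boundaries_alt source total_lines
instance (source : String) (total_lines : Int) (out : List Int) : Decidable (Spec_detect_semantic_boundaries source total_lines out) := by unfold Spec_detect_semantic_boundaries; infer_instance

-- ===== CLAIM (what is proved, stated in full; the proofs are below) =====
def Claim_equal_detect_semantic_boundaries : Prop := ∀ (source : String) (total_lines : Int), Dom_detect_semantic_boundaries source total_lines → Spec_detect_semantic_boundaries source total_lines (detect_semantic_boundaries source total_lines)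

-- ===== LEMMAS AND PROOFS =====

-- `nbAt bl L i` : there is a line at index i and it is non-blank (bl = "is blank")
def nbAt {α : Type} (bl : α → Bool) (L : List α) (i : Nat) : Bool :=
  L[i]?.any (fun a => !bl a)

-- index of the nearest non-blank line before i, or -1
def prevNb {α : Type} (bl : α → Bool) (L : List α) : Nat → Int
  | 0 => -1
  | i+1 => if nbAt bl L i then (i : Int) else prevNb bl L i

lemma prevNb_lt {α : Type} (bl : α → Bool) (L : List α) (i : Nat) :
    prevNb bl L i < (i : Int) := by
  induction i with
  | zero => simp [prevNb]
  | succ j ih => by_cases h : nbAt bl L j <;> simp [prevNb, h] <;> omega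

lemma prevNb_max {α : Type} (bl : α → Bool) (L : List α) (i k : Nat)
    (h1 : prevNb bl L i < (k : Int)) (h2 : k < i) : nbAt bl L k = false := by
  induction i with
  | zero => omega
  | succ j ih =>
    by_cases h : nbAt bl L j
    · simp [prevNb, h] at h1
      by_cases hk : k = j
      · omega
      · exact ih (by omega) (by omega)
    · simp [prevNb, h] at h1
      by_cases hk : k = j
      · subst hk; simpa using h
      · exact ih h1 (by omega)

lemma prevNb_succ_true {α : Type} (bl : α → Bool) (L : List α) (i : Nat)
    (h : nbAt bl L i = true) : prevNb bl L (i+1) = (i : Int) := by simp [prevNb, h]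

lemma prevNb_succ_false {α : Type} (bl : α → Bool) (L : List α) (i : Nat)
    (h : nbAt bl L i = false) : prevNb bl L (i+1) = prevNb bl L i := by simp [prevNb, h]

-- the three per-index boundary conditions (over the whole list L, indices ≥ m)
def P1 {α : Type} (bl : α → Bool) (L : List α) (m : Nat) (x : Int) : Prop :=
  ∃ i : Nat, m ≤ i ∧ nbAt bl L i = true ∧ 2 ≤ i ∧ nbAt bl L (i-1) = false ∧
    nbAt bl L (i-2) = false ∧ x = prevNb bl L i + 2

def P2 {α : Type} (cm : α → Bool) (L : List α) (N : Int) (m : Nat) (x : Int) : Prop :=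
  ∃ i : Nat, m ≤ i ∧ (L[i]?.any cm) = true ∧ (i : Int) + 2 < N ∧ x = (i : Int) + 2

def P3 {α : Type} (bl an : α → Bool) (L : List α) (m : Nat) (x : Int) : Prop :=
  ∃ i : Nat, m ≤ i ∧ (L[i]?.any (fun a => !bl a && !an a)) = true ∧
    0 ≤ prevNb bl L i ∧ (L[(prevNb bl L i).toNat]?.any an) = true ∧ x = (i : Int) + 1

lemma enumerate_map {α β : Type} (f : α → β) (l : List α) (s : Int) :
    PySem.List.enumerate (l.map f) s = (PySem.List.enumerate l s).map (fun p => (p.1, f p.2)) := by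
  induction l generalizing s with
  | nil => simp [PySem.List.enumerate_nil]
  | cons h t ih => simp [PySem.List.enumerate_cons, ih]

-- generic: a fold whose step's membership is pointwise characterised
lemma mem_foldl_of_step {β : Type} (step : PySem.Set Int → β → PySem.Set Int)
    (P : β → Int → Prop) (x : Int)
    (hstep : ∀ S e, x ∈ step S e ↔ x ∈ S ∨ P e x) :
    ∀ (l : List β) (S : PySem.Set Int), x ∈ l.foldl step S ↔ x ∈ S ∨ ∃ e ∈ l, P e x := by
  intro l
  induction l with
  | nil => simp
  | cons h t ih => intro S; rw [List.foldl_cons, ih, hstep]; simp; tauto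

-- generic: folds preserve Nodup of the carried set
lemma nodup_foldl_proj {β σ : Type} (step : σ → β → σ) (proj : σ → PySem.Set Int)
    (hstep : ∀ s e, (proj s).Nodup → (proj (step s e)).Nodup) :
    ∀ (l : List β) (s : σ), (proj s).Nodup → (proj (l.foldl step s)).Nodup := by
  intro l
  induction l with
  | nil => intro s h; exact h
  | cons h t ih => intro s hs; exact ih _ (hstep _ _ hs)

lemma drop_cons {α : Type} {L t : List α} {m : Nat} {h : α}
    (hd : L.drop m = h :: t) : L[m]? = some h ∧ L.drop (m+1) = t := by
  constructor
  · have h0 : (List.drop m L)[0]? = L[m+0]? := List.getElem?_drop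
    rw [hd] at h0; simpa using h0.symm
  · rw [← List.tail_drop, hd]; rfl

set_option maxHeartbeats 1000000 in
lemma pass1_mem {α : Type} (bl : α → Bool) (L : List α) :
    ∀ (suf : List α) (m : Nat), L.drop m = suf → ∀ (r : Int) (S : PySem.Set Int),
    (0 ≤ r ↔ (0 < m ∧ nbAt bl L (m-1) = false)) →
    (0 ≤ r → r = prevNb bl L m + 1) →
    ∀ x : Int,
    x ∈ ((PySem.List.enumerate suf m).foldl
      (fun (st : Int × PySem.Set Int) (il : Int × α) =>
        if bl il.2 then
          (if st.1 < 0 then (il.1, st.2) else st)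
        else
          (-1, if st.1 ≥ 0 ∧ il.1 - st.1 ≥ 2 then PySem.Set.add st.2 (st.1 + 1) else st.2))
      (r, S)).2 ↔ x ∈ S ∨ P1 bl L m x := by
  intro suf
  induction suf with
  | nil =>
    intro m hd r S h1 h2 x
    have hlen : L.length ≤ m := by simpa [List.drop_eq_nil_iff] using hd
    have hnp : ¬ P1 bl L m x := by
      rintro ⟨i, hmi, hnbi, -, -, -, -⟩
      unfold nbAt at hnbi
      rw [List.getElem?_eq_none (by omega)] at hnbi
      simp at hnbi
    simp [PySem.List.enumerate_nil]
    tauto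
  | cons h t ih =>
    intro m hd r S h1 h2 x
    obtain ⟨hm, ht⟩ := drop_cons hd
    have hnb : nbAt bl L m = !bl h := by simp [nbAt, hm]
    have hcast : ((m : Int) + 1) = ((m + 1 : Nat) : Int) := by push_cast; ring
    rw [PySem.List.enumerate_cons, List.foldl_cons]
    dsimp only
    by_cases hb : bl h = true
    · -- blank line: set unchanged, run start recorded
      rw [if_pos hb]
      have hnbf : nbAt bl L m = false := by simp [hnb, hb]
      have hshift : P1 bl L m x ↔ P1 bl L (m+1) x := by
        constructor
        · rintro ⟨i, hmi, hnbi, rest⟩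
          refine ⟨i, ?_, hnbi, rest⟩
          rcases Nat.eq_or_lt_of_le hmi with he | hl
          · subst he; rw [hnbf] at hnbi; cases hnbi
          · omega
        · rintro ⟨i, hmi, rest⟩; exact ⟨i, by omega, rest⟩
      have hpn : prevNb bl L (m+1) = prevNb bl L m := prevNb_succ_false bl L m hnbf
      by_cases hr : r < 0
      · have hinv1 : (0 ≤ (m : Int)) ↔ (0 < m+1 ∧ nbAt bl L (m+1-1) = false) := by
          constructor
          · intro _; exact ⟨by omega, by simpa using hnbf⟩
          · intro _; omega
        have hinv2 : 0 ≤ (m : Int) → (m : Int) = prevNb bl L (m+1) + 1 := by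
          intro _
          rw [hpn]
          rcases Nat.eq_zero_or_pos m with h0 | hpos
          · subst h0; simp [prevNb]
          · have hnb1 : nbAt bl L (m-1) = true := by
              by_contra hcon
              have := h1.mpr ⟨hpos, by simpa using hcon⟩
              omega
            have hm1 : m = (m-1)+1 := by omega
            conv_rhs => rw [hm1]
            rw [prevNb_succ_true bl L (m-1) hnb1]
            omega
        rw [if_pos hr, hcast, ih (m+1) ht _ S hinv1 hinv2 x, hshift]
      · have hinv1 : 0 ≤ r ↔ (0 < m+1 ∧ nbAt bl L (m+1-1) = false) := by
          constructor
          · intro _; exact ⟨by omega, by simpa using hnbf⟩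
          · intro _; omega
        have hinv2 : 0 ≤ r → r = prevNb bl L (m+1) + 1 := by
          intro hr0; rw [hpn]; exact h2 hr0
        rw [if_neg hr, hcast, ih (m+1) ht r S hinv1 hinv2 x, hshift]
    · -- non-blank line: possibly emit the boundary, reset the run
      rw [if_neg hb]
      have hnbt : nbAt bl L m = true := by simp [hnb, hb]
      have hsplit : P1 bl L m x ↔
          (2 ≤ m ∧ nbAt bl L (m-1) = false ∧ nbAt bl L (m-2) = false ∧ x = prevNb bl L m + 2)
          ∨ P1 bl L (m+1) x := by
        constructor
        · rintro ⟨i, hmi, hnbi, hrest⟩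
          rcases Nat.eq_or_lt_of_le hmi with he | hl
          · subst he; exact Or.inl hrest
          · exact Or.inr ⟨i, by omega, hnbi, hrest⟩
        · rintro (⟨ha, hbb, hcc, hdd⟩ | ⟨i, hmi, rest⟩)
          · exact ⟨m, le_refl m, hnbt, ha, hbb, hcc, hdd⟩
          · exact ⟨i, by omega, rest⟩
      have hiff : ((r ≥ 0 ∧ (m : Int) - r ≥ 2) ∧ x = r + 1) ↔
          (2 ≤ m ∧ nbAt bl L (m-1) = false ∧ nbAt bl L (m-2) = false ∧ x = prevNb bl L m + 2) := by
        constructor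
        · rintro ⟨⟨hr0, hr2⟩, hx⟩
          obtain ⟨hm0, hb1⟩ := h1.mp hr0
          have hre := h2 hr0
          have h2m : 2 ≤ m := by omega
          have hb2 : nbAt bl L (m-2) = false := by
            apply prevNb_max bl L m (m-2)
            · push_cast [Nat.cast_sub (by omega : 2 ≤ m)]; omega
            · omega
          exact ⟨h2m, hb1, hb2, by omega⟩
        · rintro ⟨h2m, hb1, hb2, hx⟩
          have hr0 : 0 ≤ r := h1.mpr ⟨by omega, hb1⟩
          have hre := h2 hr0
          have hm1 : m = (m-1)+1 := by omega
          have hm2 : m - 1 = (m-2)+1 := by omega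
          have hpv : prevNb bl L m = prevNb bl L (m-2) := by
            conv_lhs => rw [hm1]
            rw [prevNb_succ_false bl L (m-1) hb1]
            conv_lhs => rw [hm2]
            rw [prevNb_succ_false bl L (m-2) hb2]
          have hlt := prevNb_lt bl L (m-2)
          have hcst : ((m - 2 : Nat) : Int) = (m : Int) - 2 := by
            push_cast [Nat.cast_sub (by omega : 2 ≤ m)]; ring
          refine ⟨⟨hr0, ?_⟩, ?_⟩ <;> omega
      have hinv1 : (0 ≤ (-1 : Int)) ↔ (0 < m+1 ∧ nbAt bl L (m+1-1) = false) := by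
        simp [hnbt]
      have hinv2 : 0 ≤ (-1 : Int) → (-1 : Int) = prevNb bl L (m+1) + 1 := by
        intro hcon; omega
      by_cases hc : r ≥ 0 ∧ (m : Int) - r ≥ 2
      · rw [if_pos hc, hcast, ih (m+1) ht (-1) _ hinv1 hinv2 x, hsplit]
        have hxiff : x = r + 1 ↔
            (2 ≤ m ∧ nbAt bl L (m-1) = false ∧ nbAt bl L (m-2) = false ∧ x = prevNb bl L m + 2) :=
          ⟨fun hx => hiff.mp ⟨hc, hx⟩, fun hbig => (hiff.mpr hbig).2⟩
        rw [PySem.Set.mem_add]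
        constructor
        · rintro ((hs | hx) | hp)
          · exact Or.inl hs
          · exact Or.inr (Or.inl (hxiff.mp hx))
          · exact Or.inr (Or.inr hp)
        · rintro (hs | (hbig | hp))
          · exact Or.inl (Or.inl hs)
          · exact Or.inl (Or.inr (hxiff.mpr hbig))
          · exact Or.inr hp
      · rw [if_neg hc, hcast, ih (m+1) ht (-1) S hinv1 hinv2 x, hsplit]
        have hnbig : ¬ (2 ≤ m ∧ nbAt bl L (m-1) = false ∧ nbAt bl L (m-2) = false ∧ x = prevNb bl L m + 2) := by
          intro hbig
          exact hc (hiff.mpr hbig).1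
        constructor
        · rintro (hs | hp)
          · exact Or.inl hs
          · exact Or.inr (Or.inr hp)
        · rintro (hs | (hbig | hp))
          · exact Or.inl hs
          · exact (hnbig hbig).elim
          · exact Or.inr hp

lemma pass2_mem {α : Type} (cm : α → Bool) (L : List α) (N : Int) :
    ∀ (suf : List α) (m : Nat), L.drop m = suf → ∀ (S : PySem.Set Int) (x : Int),
    x ∈ (PySem.List.enumerate suf m).foldl
      (fun (b : PySem.Set Int) (il : Int × α) =>
        if cm il.2 then (if il.1 + 2 < N then PySem.Set.add b (il.1 + 2) else b) else b) S
    ↔ x ∈ S ∨ P2 cm L N m x := by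
  intro suf
  induction suf with
  | nil =>
    intro m hd S x
    have hlen : L.length ≤ m := by simpa [List.drop_eq_nil_iff] using hd
    have hnp : ¬ P2 cm L N m x := by
      rintro ⟨i, hmi, hany, -, -⟩
      rw [List.getElem?_eq_none (by omega)] at hany
      simp at hany
    simp [PySem.List.enumerate_nil]
    tauto
  | cons h t ih =>
    intro m hd S x
    obtain ⟨hm, ht⟩ := drop_cons hd
    rw [PySem.List.enumerate_cons, List.foldl_cons]
    have hcast : ((m : Int) + 1) = ((m + 1 : Nat) : Int) := by push_cast; ring
    rw [hcast, ih (m+1) ht _ x]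
    have hsplit : P2 cm L N m x ↔ (cm h = true ∧ (m : Int) + 2 < N ∧ x = (m : Int) + 2) ∨ P2 cm L N (m+1) x := by
      constructor
      · rintro ⟨i, hmi, hany, hN, hx⟩
        rcases Nat.eq_or_lt_of_le hmi with heq | hlt
        · subst heq; left; rw [hm] at hany; simp at hany; exact ⟨hany, hN, hx⟩
        · right; exact ⟨i, by omega, hany, hN, hx⟩
      · rintro (⟨h1, h2, h3⟩ | ⟨i, hmi, hany, hN, hx⟩)
        · exact ⟨m, le_refl m, by simp [hm, h1], h2, h3⟩
        · exact ⟨i, by omega, hany, hN, hx⟩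
    rw [hsplit]
    by_cases hc : cm h = true <;> by_cases hN : (m : Int) + 2 < N <;>
      simp [hc, hN, PySem.Set.mem_add] <;> tauto

set_option maxHeartbeats 1000000 in
lemma pass3_mem {α : Type} (bl an : α → Bool) (L : List α)
    (hann : ∀ a, an a = true → bl a = false) :
    ∀ (suf : List α) (m : Nat), L.drop m = suf → ∀ (b : Bool) (S : PySem.Set Int),
    (b = true ↔ (0 ≤ prevNb bl L m ∧ (L[(prevNb bl L m).toNat]?.any an) = true)) →
    ∀ x : Int,
    x ∈ ((PySem.List.enumerate suf m).foldl
      (fun (st : Bool × PySem.Set Int) (il : Int × α) =>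
        if an il.2 then (true, st.2)
        else if st.1 && !bl il.2 then (false, PySem.Set.add st.2 (il.1 + 1))
        else st)
      (b, S)).2 ↔ x ∈ S ∨ P3 bl an L m x := by
  intro suf
  induction suf with
  | nil =>
    intro m hd b S hbinv x
    have hlen : L.length ≤ m := by simpa [List.drop_eq_nil_iff] using hd
    have hnp : ¬ P3 bl an L m x := by
      rintro ⟨i, hmi, hcond, -, -, -⟩
      rw [List.getElem?_eq_none (by omega)] at hcond
      simp at hcond
    simp [PySem.List.enumerate_nil]
    tauto
  | cons h t ih =>
    intro m hd b S hbinv x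
    obtain ⟨hm, ht⟩ := drop_cons hd
    have hnb : nbAt bl L m = !bl h := by simp [nbAt, hm]
    have hcast : ((m : Int) + 1) = ((m + 1 : Nat) : Int) := by push_cast; ring
    rw [PySem.List.enumerate_cons, List.foldl_cons]
    dsimp only
    by_cases ha : an h = true
    · -- annotation line: flag set, set unchanged
      have hbl : bl h = false := hann h ha
      have hnbt : nbAt bl L m = true := by simp [hnb, hbl]
      have hpn : prevNb bl L (m+1) = (m : Int) := prevNb_succ_true bl L m hnbt
      have hinv : (true = true) ↔
          (0 ≤ prevNb bl L (m+1) ∧ (L[(prevNb bl L (m+1)).toNat]?.any an) = true) := by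
        rw [hpn]; simp [hm, ha]
      have hshift : P3 bl an L m x ↔ P3 bl an L (m+1) x := by
        constructor
        · rintro ⟨i, hmi, hcond, rest⟩
          refine ⟨i, ?_, hcond, rest⟩
          rcases Nat.eq_or_lt_of_le hmi with he | hl
          · subst he; rw [hm] at hcond; simp [ha] at hcond
          · omega
        · rintro ⟨i, hmi, rest⟩; exact ⟨i, by omega, rest⟩
      rw [if_pos ha, hcast, ih (m+1) ht true S hinv x, hshift]
    · by_cases hbl : bl h = true
      · -- blank line: nothing changes
        have hnbf : nbAt bl L m = false := by simp [hnb, hbl]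
        have hpn : prevNb bl L (m+1) = prevNb bl L m := prevNb_succ_false bl L m hnbf
        have hinv : (b = true) ↔
            (0 ≤ prevNb bl L (m+1) ∧ (L[(prevNb bl L (m+1)).toNat]?.any an) = true) := by
          rw [hpn]; exact hbinv
        have hshift : P3 bl an L m x ↔ P3 bl an L (m+1) x := by
          constructor
          · rintro ⟨i, hmi, hcond, rest⟩
            refine ⟨i, ?_, hcond, rest⟩
            rcases Nat.eq_or_lt_of_le hmi with he | hl
            · subst he; rw [hm] at hcond; simp [hbl] at hcond
            · omega
          · rintro ⟨i, hmi, rest⟩; exact ⟨i, by omega, rest⟩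
        have hbf : (b && !bl h) = false := by simp [hbl]
        rw [if_neg ha, if_neg (by simp [hbf] : ¬ (b && !bl h) = true), hcast,
          ih (m+1) ht b S hinv x, hshift]
      · -- non-blank, non-annotation line: emit boundary iff the flag is set
        have hnbt : nbAt bl L m = true := by simp [hnb, hbl]
        have hpn : prevNb bl L (m+1) = (m : Int) := prevNb_succ_true bl L m hnbt
        have hinv : (false = true) ↔
            (0 ≤ prevNb bl L (m+1) ∧ (L[(prevNb bl L (m+1)).toNat]?.any an) = true) := by
          rw [hpn]; simp [hm, ha]
        have hsplit : P3 bl an L m x ↔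
            ((0 ≤ prevNb bl L m ∧ (L[(prevNb bl L m).toNat]?.any an) = true) ∧ x = (m : Int) + 1)
            ∨ P3 bl an L (m+1) x := by
          constructor
          · rintro ⟨i, hmi, hcond, hq, hqa, hx⟩
            rcases Nat.eq_or_lt_of_le hmi with he | hl
            · subst he; exact Or.inl ⟨⟨hq, hqa⟩, hx⟩
            · exact Or.inr ⟨i, by omega, hcond, hq, hqa, hx⟩
          · rintro (⟨⟨hq, hqa⟩, hx⟩ | ⟨i, hmi, rest⟩)
            · refine ⟨m, le_refl m, ?_, hq, hqa, hx⟩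
              rw [hm]
              simp [hbl, ha]
            · exact ⟨i, by omega, rest⟩
        cases b
        · have hnflag : ¬ (0 ≤ prevNb bl L m ∧ (L[(prevNb bl L m).toNat]?.any an) = true) := by
            intro hflag
            exact absurd (hbinv.mpr hflag) (by simp)
          rw [if_neg ha, if_neg (by simp : ¬ (false && !bl h) = true), hcast,
            ih (m+1) ht false S hinv x, hsplit]
          constructor
          · rintro (hs | hp)
            · exact Or.inl hs
            · exact Or.inr (Or.inr hp)
          · rintro (hs | (⟨hflag, -⟩ | hp))
            · exact Or.inl hs
            · exact (hnflag hflag).elim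
            · exact Or.inr hp
        · have hflag : (0 ≤ prevNb bl L m ∧ (L[(prevNb bl L m).toNat]?.any an) = true) :=
            hbinv.mp rfl
          rw [if_neg ha, if_pos (by simp [hbl] : (true && !bl h) = true), hcast,
            ih (m+1) ht false _ hinv x, hsplit, PySem.Set.mem_add]
          constructor
          · rintro ((hs | hx) | hp)
            · exact Or.inl hs
            · exact Or.inr (Or.inl ⟨hflag, hx⟩)
            · exact Or.inr (Or.inr hp)
          · rintro (hs | (⟨-, hx⟩ | hp))
            · exact Or.inl (Or.inl hs)
            · exact Or.inl (Or.inr hx)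
            · exact Or.inr hp

lemma prev_fold {α : Type} (bl : α → Bool) (L : List α) :
    ∀ (suf : List α) (m : Nat), L.drop m = suf → ∀ (acc : List Int),
    (PySem.List.enumerate suf m).foldl
      (fun (acc : Int × List Int) (is : Int × α) =>
        (if !bl is.2 then is.1 else acc.1, acc.2 ++ [acc.1]))
      (prevNb bl L m, acc)
    = (prevNb bl L (m + suf.length), acc ++ (List.range' m suf.length).map (fun k => prevNb bl L k)) := by
  intro suf
  induction suf with
  | nil => intro m hd acc; simp [PySem.List.enumerate_nil]
  | cons h t ih =>
    intro m hd acc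
    obtain ⟨hm, ht⟩ := drop_cons hd
    have hnb : nbAt bl L m = !bl h := by simp [nbAt, hm]
    rw [PySem.List.enumerate_cons, List.foldl_cons]
    have hstep1 : (if !bl h then (m : Int) else prevNb bl L m) = prevNb bl L (m+1) := by
      by_cases hb : bl h
      · rw [prevNb_succ_false bl L m (by simp [hnb, hb])]; simp [hb]
      · rw [prevNb_succ_true bl L m (by simp [hnb, hb])]; simp [hb]
    have hcast : ((m : Int) + 1) = ((m + 1 : Nat) : Int) := by push_cast; ring
    simp only [hstep1, hcast]
    have hlen : m + 1 + t.length = m + (h :: t).length := by simp; omega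
    rw [ih (m+1) ht (acc ++ [prevNb bl L m]), hlen]
    simp [List.range'_succ, List.append_assoc]

-- concrete per-line predicates: blank, annotation, block-comment end
abbrev blS : String → Bool := fun s => s == ""
abbrev anS : String → Bool := fun s => PySem.Str.startswith s "@"
abbrev cmS : String → Bool := fun s =>
  s == "*/" || (PySem.Str.endswith s "*/" && PySem.Str.startswith s "*")

lemma hannS : ∀ s, anS s = true → blS s = false := by
  intro s h
  by_contra hc
  have hs : s = "" := by simpa [blS] using hc
  subst hs
  exact absurd h (by decide)

lemma any_getElem?_lt {α : Type} (f : α → Bool) (L : List α) (i : Nat)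
    (h : (L[i]?.any f) = true) : i < L.length := by
  cases ho : L[i]? with
  | none => rw [ho] at h; simp at h
  | some a =>
    obtain ⟨hlt, -⟩ := List.getElem?_eq_some_iff.mp ho
    exact hlt

-- the per-element condition of B's fused loop
def PB (st : List String) (prevE : List Int) (n : Int) (e : Int × String) (x : Int) : Prop :=
  ((!(e.2 == "")) = true ∧
      (2 ≤ e.1 ∧ (PySem.List.pyGetD st (e.1 - 1) "" == "") = true ∧
        (PySem.List.pyGetD st (e.1 - 2) "" == "") = true) ∧
      x = PySem.List.pyGetD prevE e.1 (-1) + 2)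
  ∨ ((!(e.2 == "")) = true ∧
      ((!PySem.Str.startswith e.2 "@") = true ∧ 0 ≤ PySem.List.pyGetD prevE e.1 (-1) ∧
        (PySem.Str.startswith (PySem.List.pyGetD st (PySem.List.pyGetD prevE e.1 (-1)) "") "@") = true) ∧
      x = e.1 + 1)
  ∨ (((e.2 == "*/" || (PySem.Str.endswith e.2 "*/" && PySem.Str.startswith e.2 "*"))) = true ∧
      e.1 + 2 < n ∧ x = e.1 + 2)

lemma mem_ite_add (c : Prop) [inst : Decidable c] (b : PySem.Set Int) (v x : Int) :
    x ∈ (if c then PySem.Set.add b v else b) ↔ x ∈ b ∨ (c ∧ x = v) := by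
  split_ifs with h <;> simp [PySem.Set.mem_add, h]

-- named copies of the loop bodies of both ports (reducible, so they are defeq to the inline lambdas)
@[reducible] def step1A : Int × PySem.Set Int → Int × String → Int × PySem.Set Int :=
  fun st il =>
    if PySem.Str.strip il.2 == "" then
      (if st.1 < 0 then (il.1, st.2) else st)
    else
      (-1, if st.1 ≥ 0 ∧ il.1 - st.1 ≥ 2 then PySem.Set.add st.2 (st.1 + 1) else st.2)

@[reducible] def step2A (N : Int) : PySem.Set Int → Int × String → PySem.Set Int :=
  fun b il =>
    let stripped := PySem.Str.strip il.2
    if stripped == "*/" || (PySem.Str.endswith stripped "*/" && PySem.Str.startswith stripped "*") then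
      (if il.1 + 2 < N then PySem.Set.add b (il.1 + 2) else b)
    else b

@[reducible] def step3A : Bool × PySem.Set Int → Int × String → Bool × PySem.Set Int :=
  fun st il =>
    let stripped := PySem.Str.strip il.2
    if PySem.Str.startswith stripped "@" then (true, st.2)
    else if st.1 && !(stripped == "") then (false, PySem.Set.add st.2 (il.1 + 1))
    else st

@[reducible] def step1S : Int × PySem.Set Int → Int × String → Int × PySem.Set Int :=
  fun st il =>
    if il.2 == "" then
      (if st.1 < 0 then (il.1, st.2) else st)
    else
      (-1, if st.1 ≥ 0 ∧ il.1 - st.1 ≥ 2 then PySem.Set.add st.2 (st.1 + 1) else st.2)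

@[reducible] def step2S (N : Int) : PySem.Set Int → Int × String → PySem.Set Int :=
  fun b il =>
    if il.2 == "*/" || (PySem.Str.endswith il.2 "*/" && PySem.Str.startswith il.2 "*") then
      (if il.1 + 2 < N then PySem.Set.add b (il.1 + 2) else b)
    else b

@[reducible] def step3S : Bool × PySem.Set Int → Int × String → Bool × PySem.Set Int :=
  fun st il =>
    if PySem.Str.startswith il.2 "@" then (true, st.2)
    else if st.1 && !(il.2 == "") then (false, PySem.Set.add st.2 (il.1 + 1))
    else st

@[reducible] def stepPrev : Int × List Int → Int × String → Int × List Int :=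
  fun acc is => (if !(is.2 == "") then is.1 else acc.1, acc.2 ++ [acc.1])

@[reducible] def stepB (st : List String) (prevE : List Int) (n : Int) :
    PySem.Set Int → Int × String → PySem.Set Int :=
  fun b is =>
    let b :=
      if !(is.2 == "") then
        let b :=
          if 2 ≤ is.1 ∧ PySem.List.pyGetD st (is.1 - 1) "" == "" ∧ PySem.List.pyGetD st (is.1 - 2) "" == ""
          then PySem.Set.add b (PySem.List.pyGetD prevE is.1 (-1) + 2) else b
        let q := PySem.List.pyGetD prevE is.1 (-1)
        if !PySem.Str.startswith is.2 "@" ∧ 0 ≤ q ∧ PySem.Str.startswith (PySem.List.pyGetD st q "") "@"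
        then PySem.Set.add b (is.1 + 1) else b
      else b
    if (is.2 == "*/" || (PySem.Str.endswith is.2 "*/" && PySem.Str.startswith is.2 "*")) ∧ is.1 + 2 < n
    then PySem.Set.add b (is.1 + 2) else b

set_option maxHeartbeats 1000000 in
lemma B_step_mem (st : List String) (prevE : List Int) (n : Int) (S : PySem.Set Int)
    (e : Int × String) (x : Int) :
    x ∈ stepB st prevE n S e ↔ x ∈ S ∨ PB st prevE n e x := by
  dsimp only [stepB]
  by_cases h0 : (!(e.2 == "")) = true
  · simp [PB, h0, mem_ite_add, or_assoc, and_assoc]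
  · simp [PB, h0, mem_ite_add, and_assoc]

lemma conv1 (L : List String) (init : Int × PySem.Set Int) :
    (PySem.List.enumerate L 0).foldl step1A init
      = (PySem.List.enumerate (L.map PySem.Str.strip) 0).foldl step1S init := by
  rw [enumerate_map, List.foldl_map]

lemma conv2 (L : List String) (N : Int) (init : PySem.Set Int) :
    (PySem.List.enumerate L 0).foldl (step2A N) init
      = (PySem.List.enumerate (L.map PySem.Str.strip) 0).foldl (step2S N) init := by
  rw [enumerate_map, List.foldl_map]

lemma conv3 (L : List String) (init : Bool × PySem.Set Int) :
    (PySem.List.enumerate L 0).foldl step3A init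
      = (PySem.List.enumerate (L.map PySem.Str.strip) 0).foldl step3S init := by
  rw [enumerate_map, List.foldl_map]

lemma prevE_eq (st : List String) :
    ((PySem.List.enumerate st 0).foldl stepPrev ((-1 : Int), ([] : List Int))).2
      = (List.range' 0 st.length).map (fun j => prevNb blS st j) := by
  rw [show ((-1 : Int), ([] : List Int)) = (prevNb blS st 0, ([] : List Int)) from rfl,
      show (0 : Int) = ((0 : Nat) : Int) from rfl,
      show stepPrev = (fun (acc : Int × List Int) (is : Int × String) =>
        (if !blS is.2 then is.1 else acc.1, acc.2 ++ [acc.1])) from rfl]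
  rw [prev_fold blS st st 0 rfl []]
  simp

lemma pyGetD_st (st : List String) (j : Nat) (hj : j < st.length) :
    PySem.List.pyGetD st (j : Int) "" = st[j] := by
  rw [PySem.List.pyGetD_natCast]
  exact List.getD_eq_getElem st "" hj

lemma pyGetD_prevE (st : List String) (prevE : List Int)
    (hprev : prevE = (List.range' 0 st.length).map (fun j => prevNb blS st j))
    (k : Nat) (hk : k < st.length) :
    PySem.List.pyGetD prevE (k : Int) (-1) = prevNb blS st k := by
  subst hprev
  rw [PySem.List.pyGetD_natCast]
  rw [List.getD_eq_getElem _ _ (by simpa using hk)]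
  simp [List.getElem_range' (by simpa using hk)]

set_option maxHeartbeats 1000000 in
lemma final_iff (st : List String) (prevE : List Int)
    (hprev : prevE = (List.range' 0 st.length).map (fun j => prevNb blS st j))
    (N : Int) (x : Int) :
    (∃ e ∈ PySem.List.enumerate st 0, PB st prevE N e x) ↔
      (P1 blS st 0 x ∨ P2 cmS st N 0 x ∨ P3 blS anS st 0 x) := by
  constructor
  · rintro ⟨e, he, hPB⟩
    obtain ⟨k, hk, hpe⟩ := (PySem.List.mem_enumerate_iff st 0 e).mp he
    subst hpe
    simp only [zero_add] at hPB
    rcases hPB with ⟨h0, ⟨h2k, hbm1, hbm2⟩, hx⟩ | ⟨h0, ⟨hna, hq0, hqa⟩, hx⟩ | ⟨hcm, hN2, hx⟩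
    · left
      have h2kN : 2 ≤ k := by omega
      have hc1 : ((k : Int) - 1) = ((k - 1 : Nat) : Int) := by omega
      have hc2 : ((k : Int) - 2) = ((k - 2 : Nat) : Int) := by omega
      rw [hc1, pyGetD_st st (k-1) (by omega)] at hbm1
      rw [hc2, pyGetD_st st (k-2) (by omega)] at hbm2
      rw [pyGetD_prevE st prevE hprev k hk] at hx
      refine ⟨k, Nat.zero_le k, ?_, h2kN, ?_, ?_, hx⟩
      · simp [nbAt, List.getElem?_eq_getElem hk, h0]
      · simp [nbAt, List.getElem?_eq_getElem (show k - 1 < st.length by omega)]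
        simpa using hbm1
      · simp [nbAt, List.getElem?_eq_getElem (show k - 2 < st.length by omega)]
        simpa using hbm2
    · right; right
      rw [pyGetD_prevE st prevE hprev k hk] at hq0 hqa
      have hqlt := prevNb_lt blS st k
      have htq : (((prevNb blS st k).toNat : Nat) : Int) = prevNb blS st k :=
        Int.toNat_of_nonneg hq0
      rw [← htq, pyGetD_st st (prevNb blS st k).toNat (by omega)] at hqa
      refine ⟨k, Nat.zero_le k, ?_, hq0, ?_, hx⟩
      · simp only [List.getElem?_eq_getElem hk, Option.any_some, Bool.and_eq_true]
        exact ⟨h0, hna⟩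
      · simp only [List.getElem?_eq_getElem
          (show (prevNb blS st k).toNat < st.length by omega), Option.any_some]
        exact hqa
    · right; left
      refine ⟨k, Nat.zero_le k, ?_, hN2, hx⟩
      simp [List.getElem?_eq_getElem hk, cmS]
      simpa using hcm
  · rintro (⟨k, -, hnb, h2, hb1, hb2, hx⟩ | ⟨k, -, hcm, hN2, hx⟩ | ⟨k, -, hcond, hq, hqa, hx⟩)
    · have hk := any_getElem?_lt _ st k hnb
      refine ⟨_, (PySem.List.mem_enumerate_iff st 0 _).mpr ⟨k, hk, rfl⟩, ?_⟩
      simp only [zero_add]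
      left
      simp only [nbAt, List.getElem?_eq_getElem hk] at hnb
      simp only [nbAt, List.getElem?_eq_getElem (show k - 1 < st.length by omega)] at hb1
      simp only [nbAt, List.getElem?_eq_getElem (show k - 2 < st.length by omega)] at hb2
      have hc1 : ((k : Int) - 1) = ((k - 1 : Nat) : Int) := by omega
      have hc2 : ((k : Int) - 2) = ((k - 2 : Nat) : Int) := by omega
      refine ⟨by simpa using hnb, ⟨by omega, ?_, ?_⟩, ?_⟩
      · rw [hc1, pyGetD_st st (k-1) (by omega)]
        simpa using hb1
      · rw [hc2, pyGetD_st st (k-2) (by omega)]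
        simpa using hb2
      · rw [pyGetD_prevE st prevE hprev k hk]
        exact hx
    · have hk := any_getElem?_lt _ st k hcm
      refine ⟨_, (PySem.List.mem_enumerate_iff st 0 _).mpr ⟨k, hk, rfl⟩, ?_⟩
      simp only [zero_add]
      right; right
      simp only [List.getElem?_eq_getElem hk] at hcm
      refine ⟨by simpa using hcm, hN2, hx⟩
    · have hk := any_getElem?_lt _ st k hcond
      refine ⟨_, (PySem.List.mem_enumerate_iff st 0 _).mpr ⟨k, hk, rfl⟩, ?_⟩
      simp only [zero_add]
      right; left
      simp only [List.getElem?_eq_getElem hk] at hcond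
      simp only [List.getElem?_eq_getElem
        (show (prevNb blS st k).toNat < st.length by
          have := prevNb_lt blS st k; omega)] at hqa
      have hcond' := hcond
      simp only [Option.any_some, Bool.and_eq_true] at hcond'
      have htq : (((prevNb blS st k).toNat : Nat) : Int) = prevNb blS st k :=
        Int.toNat_of_nonneg hq
      refine ⟨by simpa using hcond'.1, ⟨by simpa using hcond'.2, ?_, ?_⟩, hx⟩
      · rw [pyGetD_prevE st prevE hprev k hk]; exact hq
      · rw [pyGetD_prevE st prevE hprev k hk, ← htq,
          pyGetD_st st (prevNb blS st k).toNat (by have := prevNb_lt blS st k; omega)]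
        simpa using hqa

-- ===== VERDICT (by name: the statement is the Claim_ definition above) =====
set_option maxHeartbeats 1000000 in
theorem detect_semantic_boundaries_spec : Claim_equal_detect_semantic_boundaries := by
  intro source total_lines _
  unfold Spec_detect_semantic_boundaries
  unfold detect_semantic_boundaries detect_semantic_boundaries_alt
  by_cases htl : total_lines ≤ 0
  · rw [if_pos htl, if_pos htl]
  · rw [if_neg htl, if_neg htl]
    show PySem.List.sorted
        (((PySem.List.enumerate ((PySem.Str.split? source "\n").getD []) 0).foldl step3A
          (false,
            (PySem.List.enumerate ((PySem.Str.split? source "\n").getD []) 0).foldl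
              (step2A ((((PySem.Str.split? source "\n").getD []).length : Nat) : Int))
              ((PySem.List.enumerate ((PySem.Str.split? source "\n").getD []) 0).foldl step1A
                ((-1 : Int), PySem.Set.empty)).2)).2)
        (fun x => x) false
      = PySem.List.sorted
        ((PySem.List.enumerate (((PySem.Str.split? source "\n").getD []).map PySem.Str.strip) 0).foldl
          (stepB (((PySem.Str.split? source "\n").getD []).map PySem.Str.strip)
            ((PySem.List.enumerate (((PySem.Str.split? source "\n").getD []).map PySem.Str.strip) 0).foldl
              stepPrev ((-1 : Int), ([] : List Int))).2
            ((((((PySem.Str.split? source "\n").getD []).map PySem.Str.strip).length : Nat) : Int)))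
          PySem.Set.empty)
        (fun x => x) false
    generalize hL : (PySem.Str.split? source "\n").getD [] = lines
    rw [conv1, conv2, conv3]
    generalize hS : lines.map PySem.Str.strip = st
    have hlen : st.length = lines.length := by rw [← hS]; simp
    rw [prevE_eq st, hlen]
    apply PySem.List.sorted_eq_sorted_of_perm _ _ _ (fun a b h => h)
    refine (List.perm_ext_iff_of_nodup ?_ ?_).mpr ?_
    · exact nodup_foldl_proj _ Prod.snd
        (by intro s e hs; dsimp only [step3S]; split_ifs <;>
          first | exact hs | exact PySem.Set.nodup_add _ _ hs) _ _
        (nodup_foldl_proj _ (fun S : PySem.Set Int => S)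
          (by intro s e hs; dsimp only [step2S]; split_ifs <;>
            first | exact hs | exact PySem.Set.nodup_add _ _ hs) _ _
          (nodup_foldl_proj _ Prod.snd
            (by intro s e hs; dsimp only [step1S]; split_ifs <;>
              first | exact hs | exact PySem.Set.nodup_add _ _ hs) _ _
            List.nodup_nil))
    · exact nodup_foldl_proj _ (fun S : PySem.Set Int => S)
        (by intro s e hs; dsimp only [stepB]; split_ifs <;>
          first | exact hs
                | exact PySem.Set.nodup_add _ _ hs
                | exact PySem.Set.nodup_add _ _ (PySem.Set.nodup_add _ _ hs)
                | exact PySem.Set.nodup_add _ _ (PySem.Set.nodup_add _ _ (PySem.Set.nodup_add _ _ hs))) _ _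
        List.nodup_nil
    · intro a
      rw [show (PySem.List.enumerate st (0 : Int)) = PySem.List.enumerate st (((0 : Nat) : Int)) from rfl]
      rw [show step3S = (fun (p : Bool × PySem.Set Int) (il : Int × String) =>
            if anS il.2 then (true, p.2)
            else if p.1 && !blS il.2 then (false, PySem.Set.add p.2 (il.1 + 1))
            else p) from rfl]
      rw [pass3_mem blS anS st hannS st 0 rfl false _ (by simp [prevNb]) a]
      rw [show step2S ((lines.length : Nat) : Int) = (fun (b : PySem.Set Int) (il : Int × String) =>
            if cmS il.2 then
              (if il.1 + 2 < ((lines.length : Nat) : Int) then PySem.Set.add b (il.1 + 2) else b)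
            else b) from rfl]
      rw [pass2_mem cmS st ((lines.length : Nat) : Int) st 0 rfl _ a]
      rw [show step1S = (fun (p : Int × PySem.Set Int) (il : Int × String) =>
            if blS il.2 then
              (if p.1 < 0 then (il.1, p.2) else p)
            else
              (-1, if p.1 ≥ 0 ∧ il.1 - p.1 ≥ 2 then PySem.Set.add p.2 (p.1 + 1) else p.2)) from rfl]
      rw [pass1_mem blS st st 0 rfl (-1) PySem.Set.empty (by simp) (by intro h; omega) a]
      rw [mem_foldl_of_step _ _ a
        (fun S e => B_step_mem st ((List.range' 0 lines.length).map (fun j => prevNb blS st j))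
          ((lines.length : Nat) : Int) S e a) (PySem.List.enumerate st ((0 : Nat) : Int)) PySem.Set.empty]
      rw [show PySem.List.enumerate st (((0 : Nat) : Int)) = PySem.List.enumerate st (0 : Int) from rfl]
      rw [final_iff st ((List.range' 0 lines.length).map (fun j => prevNb blS st j)) (by rw [hlen])
        ((lines.length : Nat) : Int) a]
      have hne : a ∈ (PySem.Set.empty : PySem.Set Int) ↔ False := by
        simp [PySem.Set.empty]
      rw [hne]
      tauto
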